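-- pv_equiv track=rewrite | github.com/andrearastelli/AOC2021 | src/AOC2021/day_08/p1.py | count_digits_1_4_7_8
-- ===== SOURCE A (Python) =====
-- from itertools import chain
--
-- digit_segments = {
--     # 0: 6,
--     1: 2,
--     # 2: 5,
--     # 3: 5,
--     4: 4,
--     # 5: 5,
--     # 6: 6,
--     7: 3,
--     8: 7,
--     # 9: 6
-- }
--
-- def count_digits_1_4_7_8(input_data):
--     lines = [output for input, output in input_data]
--
--     list_numbers = [
--         [len(number) in digit_segments.values() for number in output]
--         for output in lines
--     ]
--
--     num_digits = sum(map(int, chain.from_iterable(list_numbers)))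
--
--     return num_digits
-- ===== SOURCE B (Python) =====
-- def count_digits_1_4_7_8(input_data):
--     lengths = [len(number) for _, output in input_data for number in output]
--     counts = {}
--     for n in lengths:
--         counts[n] = counts.get(n, 0) + 1
--     return counts.get(2, 0) + counts.get(3, 0) + counts.get(4, 0) + counts.get(7, 0)
-- ===== Notes on version B (the rewrite author's own statement) =====
-- stated objective: alternative
-- what changed: Instead of mapping every token to a membership-tested boolean and summing the ints, B flattens the token lengths once, builds a length-frequency dictionary, and returns the sum of the table entries for the four target lengths 2, 3, 4 and 7.
import Mathlib
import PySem

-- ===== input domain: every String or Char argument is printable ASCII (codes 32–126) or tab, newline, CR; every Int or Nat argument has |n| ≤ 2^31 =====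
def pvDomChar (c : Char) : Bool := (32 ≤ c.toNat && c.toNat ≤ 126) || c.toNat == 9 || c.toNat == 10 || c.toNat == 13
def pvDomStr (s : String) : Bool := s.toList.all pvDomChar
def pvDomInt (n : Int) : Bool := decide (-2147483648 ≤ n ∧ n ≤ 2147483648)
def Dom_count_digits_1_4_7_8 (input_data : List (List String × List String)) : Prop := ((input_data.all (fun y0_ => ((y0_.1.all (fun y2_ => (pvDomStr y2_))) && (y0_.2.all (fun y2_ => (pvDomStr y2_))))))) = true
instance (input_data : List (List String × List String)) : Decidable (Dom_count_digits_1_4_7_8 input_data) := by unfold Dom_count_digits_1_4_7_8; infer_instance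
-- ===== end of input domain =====

-- B replaces A's per-token boolean test and int-sum by a flattened length histogram (dict) summed at keys 2, 3, 4, 7; alternative decomposition, same cost.


-- ===== PORT A =====
-- digit_segments.values() in insertion order is [2, 4, 3, 7]
def count_digits_1_4_7_8 (input_data : List (List String × List String)) : Int :=
  let lines := input_data.map (fun p => p.2)
  let list_numbers := lines.map (fun output =>
    output.map (fun number => decide (PySem.Str.len number ∈ ([2, 4, 3, 7] : List Int))))
  let num_digits := (list_numbers.flatten.map (fun b => if b then (1 : Int) else 0)).sum
  num_digits

-- ===== PORT B =====
def count_digits_1_4_7_8_alt (input_data : List (List String × List String)) : Int :=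
  let lengths := input_data.flatMap (fun p => p.2.map (fun number => PySem.Str.len number))
  let counts := lengths.foldl (fun d n => d.insert n (d.getD n 0 + 1)) (PySem.Dict.empty : PySem.Dict Int Int)
  counts.getD 2 0 + counts.getD 3 0 + counts.getD 4 0 + counts.getD 7 0

-- ===== PRECONDITION & SPEC =====
def Spec_count_digits_1_4_7_8 (input_data : List (List String × List String)) (out : Int) : Prop := out = count_digits_1_4_7_8_alt input_data
instance (input_data : List (List String × List String)) (out : Int) : Decidable (Spec_count_digits_1_4_7_8 input_data out) := by unfold Spec_count_digits_1_4_7_8; infer_instance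

-- ===== CLAIM (what is proved, stated in full; the proofs are below) =====
def Claim_equal_count_digits_1_4_7_8 : Prop := ∀ (input_data : List (List String × List String)), Dom_count_digits_1_4_7_8 input_data → Spec_count_digits_1_4_7_8 input_data (count_digits_1_4_7_8 input_data)

-- ===== LEMMAS AND PROOFS =====

-- A's 0/1 sum over a list of lengths equals the four counts B reads off its histogram.
lemma sum_ite_mem_eq_counts (l : List Int) :
    (l.map (fun n => if n ∈ ([2, 4, 3, 7] : List Int) then (1 : Int) else 0)).sum
      = (l.count 2 : Int) + l.count 3 + l.count 4 + l.count 7 := by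
  induction l with
  | nil => simp
  | cons n l ih =>
    rw [List.map_cons, List.sum_cons, ih]
    simp only [List.count_cons, List.mem_cons, List.not_mem_nil, or_false]
    push_cast
    by_cases h2 : n = 2 <;> by_cases h3 : n = 3 <;> by_cases h4 : n = 4 <;> by_cases h7 : n = 7 <;>
      simp [h2, h3, h4, h7] <;> omega

-- ===== VERDICT (by name: the statement is the Claim_ definition above) =====
theorem count_digits_1_4_7_8_spec : Claim_equal_count_digits_1_4_7_8 := by
  intro input_data _
  show count_digits_1_4_7_8 input_data = count_digits_1_4_7_8_alt input_data
  unfold count_digits_1_4_7_8 count_digits_1_4_7_8_alt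
  simp only [PySem.Dict.getD_foldl_insert_add_one, PySem.Dict.getD_empty, zero_add,
    List.map_flatten, List.map_map, List.flatMap_def, List.map_map]
  rw [← sum_ite_mem_eq_counts]
  simp only [List.map_flatten, List.map_map]
  refine congrArg List.sum (congrArg List.flatten (List.map_congr_left ?_))
  intro p _
  simp [Function.comp, List.map_map, List.mem_cons]
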